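-- pv_equiv track=rewrite | github.com/shaye3/csv_analysis_agent | function_router.py | get_tools_for_question
-- ===== SOURCE A (Python) =====
-- from typing import Dict, Any, List, Callable, Optional
--
-- def get_tools_for_question(question: str) -> List[str]:
--     """
--     Suggest appropriate tools based on the question content.
--
--     Args:
--         question (str): User's question
--
--     Returns:
--         List[str]: List of suggested tool names
--     """
--     question_lower = question.lower()
--     suggested_tools = []
--
--     # Simple keyword-based tool suggestion
--     if any(keyword in question_lower for keyword in ['summary', 'overview', 'describe', 'about']):
--         suggested_tools.append('get_data_summary')
--
--     if any(keyword in question_lower for keyword in ['column', 'field', 'variable']):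
--         suggested_tools.append('get_column_info')
--
--     if any(keyword in question_lower for keyword in ['search', 'find', 'contains', 'rows with']):
--         suggested_tools.append('search_data')
--
--     if any(keyword in question_lower for keyword in ['statistics', 'stats', 'mean', 'average', 'median']):
--         suggested_tools.append('get_basic_stats')
--
--     if any(keyword in question_lower for keyword in ['count', 'frequency', 'distribution', 'values']):
--         suggested_tools.append('get_value_counts')
--
--     return suggested_tools
-- ===== SOURCE B (Python) =====
-- # B: text-driven single scan. Instead of running one substring search per keyword,
-- # walk the lowered question position by position, marking each tool whose keyword
-- # starts at that position, then emit the marked tools in the canonical order.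
-- _KEYWORD_MAP = [
--     ('summary', 'get_data_summary'), ('overview', 'get_data_summary'),
--     ('describe', 'get_data_summary'), ('about', 'get_data_summary'),
--     ('column', 'get_column_info'), ('field', 'get_column_info'),
--     ('variable', 'get_column_info'),
--     ('search', 'search_data'), ('find', 'search_data'),
--     ('contains', 'search_data'), ('rows with', 'search_data'),
--     ('statistics', 'get_basic_stats'), ('stats', 'get_basic_stats'),
--     ('mean', 'get_basic_stats'), ('average', 'get_basic_stats'),
--     ('median', 'get_basic_stats'),
--     ('count', 'get_value_counts'), ('frequency', 'get_value_counts'),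
--     ('distribution', 'get_value_counts'), ('values', 'get_value_counts'),
-- ]
-- _ORDER = ['get_data_summary', 'get_column_info', 'search_data',
--           'get_basic_stats', 'get_value_counts']
--
-- def get_tools_for_question(question: str):
--     q = question.lower()
--     found = set()
--     for i in range(len(q)):
--         for kw, tool in _KEYWORD_MAP:
--             if tool not in found and q.startswith(kw, i):
--                 found.add(tool)
--     return [t for t in _ORDER if t in found]
-- ===== Notes on version B (the rewrite author's own statement) =====
-- stated objective: alternative
-- what changed: Replaced A's keyword-driven branches (one substring search per keyword) by a single left-to-right scan over the question's positions that marks tools whose keyword starts at the current position, then emits marked tools in canonical order.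
import Mathlib
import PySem

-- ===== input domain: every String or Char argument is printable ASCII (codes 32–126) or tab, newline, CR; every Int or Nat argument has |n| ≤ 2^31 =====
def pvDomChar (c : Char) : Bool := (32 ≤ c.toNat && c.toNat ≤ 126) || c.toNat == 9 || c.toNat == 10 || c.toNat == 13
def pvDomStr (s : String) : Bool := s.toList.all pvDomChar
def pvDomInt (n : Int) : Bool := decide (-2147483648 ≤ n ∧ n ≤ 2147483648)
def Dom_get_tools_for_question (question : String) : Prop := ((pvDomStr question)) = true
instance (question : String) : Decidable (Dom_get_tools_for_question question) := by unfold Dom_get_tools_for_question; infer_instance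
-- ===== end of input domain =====

-- B replaces A's keyword-driven substring searches by one left-to-right scan over the
-- question's positions that marks matched tools, emitted afterwards in canonical order.

-- ===== PORT A =====
-- Python's substring test 'sub in s', ported by hand (exact: Python returns True iff sub occurs
-- contiguously in s; '' in s is True). Hand-ported because PySem.Str.isIn, though semantically
-- identical, is too slow for the interpreter on long inputs.
def pyInChars (sub s : List Char) : Bool :=
  sub.isPrefixOf s || (match s with | [] => false | _ :: t => pyInChars sub t)

def pyIn (sub s : String) : Bool := pyInChars sub.toList s.toList

def get_tools_for_question (question : String) : List String :=
  let question_lower := PySem.Str.lower question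
  let suggested_tools : List String := []
  let suggested_tools :=
    if ["summary", "overview", "describe", "about"].any (fun k => pyIn k question_lower)
    then suggested_tools ++ ["get_data_summary"] else suggested_tools
  let suggested_tools :=
    if ["column", "field", "variable"].any (fun k => pyIn k question_lower)
    then suggested_tools ++ ["get_column_info"] else suggested_tools
  let suggested_tools :=
    if ["search", "find", "contains", "rows with"].any (fun k => pyIn k question_lower)
    then suggested_tools ++ ["search_data"] else suggested_tools
  let suggested_tools :=
    if ["statistics", "stats", "mean", "average", "median"].any (fun k => pyIn k question_lower)
    then suggested_tools ++ ["get_basic_stats"] else suggested_tools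
  let suggested_tools :=
    if ["count", "frequency", "distribution", "values"].any (fun k => pyIn k question_lower)
    then suggested_tools ++ ["get_value_counts"] else suggested_tools
  suggested_tools

-- ===== PORT B =====
def pvKmap : List (String × String) :=
  [("summary", "get_data_summary"), ("overview", "get_data_summary"),
   ("describe", "get_data_summary"), ("about", "get_data_summary"),
   ("column", "get_column_info"), ("field", "get_column_info"),
   ("variable", "get_column_info"),
   ("search", "search_data"), ("find", "search_data"),
   ("contains", "search_data"), ("rows with", "search_data"),
   ("statistics", "get_basic_stats"), ("stats", "get_basic_stats"),
   ("mean", "get_basic_stats"), ("average", "get_basic_stats"),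
   ("median", "get_basic_stats"),
   ("count", "get_value_counts"), ("frequency", "get_value_counts"),
   ("distribution", "get_value_counts"), ("values", "get_value_counts")]

def pvOrder : List String :=
  ["get_data_summary", "get_column_info", "search_data", "get_basic_stats", "get_value_counts"]

-- the inner loop of Source B: at the current position (suffix s) mark every tool whose keyword starts here
def pvMark (s : List Char) (found : List String) : List String :=
  pvKmap.foldl (fun f p => if !f.contains p.2 && p.1.toList.isPrefixOf s then p.2 :: f else f) found

-- the outer loop of Source B: advance over the positions of q (its non-empty suffixes)
def pvScan : List Char → List String → List String
  | [], found => found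
  | s@(_ :: t), found => pvScan t (pvMark s found)

def get_tools_for_question_alt (question : String) : List String :=
  let q := PySem.Str.lower question
  let found := pvScan q.toList []
  pvOrder.filter (fun t => found.contains t)

-- ===== PRECONDITION & SPEC =====
def Spec_get_tools_for_question (question : String) (out : List String) : Prop := out = get_tools_for_question_alt question
instance (question : String) (out : List String) : Decidable (Spec_get_tools_for_question question out) := by unfold Spec_get_tools_for_question; infer_instance

-- ===== CLAIM (what is proved, stated in full; the proofs are below) =====
def Claim_equal_get_tools_for_question : Prop := ∀ (question : String), Dom_get_tools_for_question question → Spec_get_tools_for_question question (get_tools_for_question question)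

-- ===== LEMMAS AND PROOFS =====

-- membership after one pvMark step
theorem pvMark_contains (s : List Char) (found : List String) (tool : String) :
    (pvMark s found).contains tool =
      (found.contains tool || pvKmap.any (fun p => p.2 == tool && p.1.toList.isPrefixOf s)) := by
  have key : ∀ (p : String × String) (found : List String),
      ((if !found.contains p.2 && p.1.toList.isPrefixOf s then p.2 :: found else found).contains tool)
        = (found.contains tool || (p.2 == tool && p.1.toList.isPrefixOf s)) := by
    intro p found
    rw [Bool.eq_iff_iff]
    by_cases hc : p.2 ∈ found <;> by_cases hp : p.1.toList.isPrefixOf s = true <;>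
      simp [hc, hp] <;> aesop
  unfold pvMark
  generalize pvKmap = km
  induction km generalizing found with
  | nil => simp
  | cons p rest ih =>
    simp only [List.foldl_cons, List.any_cons, ih, key, Bool.or_assoc]

-- membership after the full scan: tool is found iff some keyword of tool occurs in q
theorem pvScan_contains (q : List Char) (found : List String) (tool : String)
    (hne : ∀ p ∈ pvKmap, p.1.toList ≠ []) :
    (pvScan q found).contains tool =
      (found.contains tool || pvKmap.any (fun p => p.2 == tool && pyInChars p.1.toList q)) := by
  induction q generalizing found with
  | nil =>
    simp only [pvScan]
    have h0 : pvKmap.any (fun p => p.2 == tool && pyInChars p.1.toList []) = false := by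
      rw [List.any_eq_false]
      intro p hp
      have := hne p hp
      cases h : p.1.toList with
      | nil => exact absurd h this
      | cons a l => simp [pyInChars]
    simp [h0]
  | cons c t ih =>
    simp only [pvScan, ih, pvMark_contains, Bool.or_assoc]
    congr 1
    rw [Bool.eq_iff_iff]
    simp only [Bool.or_eq_true, List.any_eq_true, Bool.and_eq_true]
    constructor
    · rintro (⟨p, hp, h1, h2⟩ | ⟨p, hp, h1, h2⟩)
      · exact ⟨p, hp, h1, by rw [pyInChars]; simp [h2]⟩
      · exact ⟨p, hp, h1, by rw [pyInChars]; simp [h2]⟩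
    · rintro ⟨p, hp, h1, h2⟩
      rw [pyInChars] at h2
      rcases Bool.or_eq_true_iff.mp h2 with h | h
      · exact Or.inl ⟨p, hp, h1, h⟩
      · exact Or.inr ⟨p, hp, h1, h⟩

-- ===== VERDICT (by name: the statement is the Claim_ definition above) =====
theorem get_tools_for_question_spec : Claim_equal_get_tools_for_question := by
  intro question _
  unfold Spec_get_tools_for_question get_tools_for_question get_tools_for_question_alt
  have hne : ∀ p ∈ pvKmap, p.1.toList ≠ [] := by decide
  simp only [pvOrder, List.filter_cons, List.filter_nil,
    pvScan_contains _ _ _ hne, List.contains_nil, Bool.false_or]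
  simp only [pvKmap, List.any_cons, List.any_nil, pyIn, Bool.or_false]
  simp only [String.reduceBEq, Bool.false_and, Bool.true_and, Bool.false_or, Bool.or_false]
  split_ifs <;> rfl
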